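-- pv_equiv track=rewrite | github.com/danwsc09/pysudoku | SudokuSolver.py | check_row_col_box
-- ===== SOURCE A (Python) =====
-- def check_row_col_box(board, row, col, n):
--     # return True if board[row][col] = n results in a possible answer
--     # return False if its not possible to reach an answer
--     if n == 0:
--         return False
--
--     # if duplicate in row, return False
--     dict_row = {}
--     for i in range(9):
--         if board[row][i] != 0:
--             if board[row][i] in dict_row:
--                 return False
--             else:
--                 dict_row[board[row][i]] = 1
--
--     # if duplicate in column, return False
--     dict_col = {}
--     for i in range(9):
--         if board[i][col] != 0:
--             if board[i][col] in dict_col: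
--                 return False
--             else:
--                 dict_col[board[i][col]] = 1
--
--     # if duplicate in box, return False
--     dict_box = {}
--     r1 = row % 3
--     c1 = col % 3
--
--     for i in range(0 - r1, 3 - r1):
--         for j in range(0 - c1, 3 - c1):
--             if board[row+i][col+j] != 0:
--                 if board[row+i][col+j] in dict_box:
--                     return False
--                 else:
--                     dict_box[board[row+i][col+j]] = 1
--     return True
-- ===== SOURCE B (Python) =====
-- def _dup_in(board, coords):
--     # pairwise duplicate test: a non-zero cell equal to any earlier cell of the group
--     for j in range(len(coords)):
--         rj, cj = coords[j]
--         vj = board[rj][cj]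
--         if vj != 0:
--             for k in range(j):
--                 rk, ck = coords[k]
--                 if board[rk][ck] == vj:
--                     return True
--     return False
--
--
-- def check_row_col_box(board, row, col, n):
--     if n == 0:
--         return False
--     br, bc = 3 * (row // 3), 3 * (col // 3)
--     groups = [
--         [(row, i) for i in range(9)],
--         [(i, col) for i in range(9)],
--         [(br + i, bc + j) for i in range(3) for j in range(3)],
--     ]
--     return not any(_dup_in(board, g) for g in groups)
-- ===== Notes on version B (the rewrite author's own statement) =====
-- stated objective: alternative
-- what changed: Replaces the three incremental seen-dict loops with one reusable pairwise duplicate test (nested index loops, no auxiliary structure) over precomputed coordinate lists, with the box origin computed as 3*(row//3), 3*(col//3) instead of offset ranges.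
import Mathlib
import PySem

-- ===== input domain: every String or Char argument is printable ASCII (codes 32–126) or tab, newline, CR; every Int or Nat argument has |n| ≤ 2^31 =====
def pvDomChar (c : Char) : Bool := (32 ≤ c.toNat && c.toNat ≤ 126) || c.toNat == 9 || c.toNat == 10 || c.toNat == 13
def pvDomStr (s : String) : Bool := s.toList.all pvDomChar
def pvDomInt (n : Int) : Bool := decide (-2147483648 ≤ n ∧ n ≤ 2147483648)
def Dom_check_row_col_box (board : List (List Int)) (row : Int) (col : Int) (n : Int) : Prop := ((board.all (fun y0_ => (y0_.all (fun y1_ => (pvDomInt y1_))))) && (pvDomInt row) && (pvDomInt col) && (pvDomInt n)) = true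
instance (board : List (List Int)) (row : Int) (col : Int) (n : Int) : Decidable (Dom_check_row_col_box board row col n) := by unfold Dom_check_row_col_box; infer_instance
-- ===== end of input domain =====

-- ===== PORT A =====
-- B changes: duplicates are found by a pairwise comparison over precomputed coordinate lists (one
-- helper reused for row, column and box, box origin 3*(row//3)/3*(col//3)) instead of A's three
-- incremental seen-dict loops (objective: alternative).

-- board[r][c] with 0 for an absent cell; under Pre_check_row_col_box every access both ports make
-- exists, so the default is never read there (outside Pre_ the Pythons raise IndexError).
def pvCell (board : List (List Int)) (r c : Int) : Int :=
  PySem.List.pyGetD (PySem.List.pyGetD board r []) c 0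

-- A's 'for …: if cell != 0: if cell in dict: return False else dict[cell] = 1' loop over a list of cells.
def pvScanA (cells : List Int) (d : PySem.Dict Int Int) : Bool :=
  match cells with
  | [] => true
  | v :: rest =>
    if v ≠ 0 then
      if PySem.Dict.contains d v then false
      else pvScanA rest (PySem.Dict.insert d v 1)
    else pvScanA rest d

def check_row_col_box (board : List (List Int)) (row : Int) (col : Int) (n : Int) : Bool :=
  if n = 0 then false
  else if pvScanA ((PySem.List.pyRange 0 9 1).map fun i => pvCell board row i) PySem.Dict.empty = false then
    false
  else if pvScanA ((PySem.List.pyRange 0 9 1).map fun i => pvCell board i col) PySem.Dict.empty = false then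
    false
  else
    let r1 := PySem.Int.mod row 3
    let c1 := PySem.Int.mod col 3
    pvScanA ((PySem.List.pyRange (0 - r1) (3 - r1) 1).flatMap fun i =>
      (PySem.List.pyRange (0 - c1) (3 - c1) 1).map fun j => pvCell board (row + i) (col + j))
      PySem.Dict.empty

-- ===== PORT B =====
-- _dup_in(board, coords): some non-zero cell equals an earlier cell of the group (nested index loops).
def pvDupIn (board : List (List Int)) (coords : List (Int × Int)) : Bool :=
  (List.range coords.length).any fun j =>
    pvCell board (coords[j]!).1 (coords[j]!).2 ≠ 0 &&
      ((List.range j).any fun k =>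
        pvCell board (coords[k]!).1 (coords[k]!).2 == pvCell board (coords[j]!).1 (coords[j]!).2)

def check_row_col_box_alt (board : List (List Int)) (row : Int) (col : Int) (n : Int) : Bool :=
  if n = 0 then false
  else
    let br := 3 * PySem.Int.floordiv row 3
    let bc := 3 * PySem.Int.floordiv col 3
    let groups := [
      (PySem.List.pyRange 0 9 1).map fun i => (row, i),
      (PySem.List.pyRange 0 9 1).map fun i => (i, col),
      (PySem.List.pyRange 0 3 1).flatMap fun i =>
        (PySem.List.pyRange 0 3 1).map fun j => (br + i, bc + j)]
    !(groups.any fun g => pvDupIn board g)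

-- ===== PRECONDITION & SPEC =====
-- The value of the Python access board[rc.1][rc.2] when it succeeds (negative indices wrap), none
-- where it raises IndexError; used by Pre_ to state which accesses exist and where a duplicate lies.
def pvAcc? (board : List (List Int)) (rc : Int × Int) : Option Int :=
  match PySem.List.pyGet? board rc.1 with
  | none => none
  | some rl => PySem.List.pyGet? rl rc.2

-- The cell coordinates each of A's three scans reads, in scan order.
def pvCoordsRow (row : Int) : List (Int × Int) := (PySem.List.pyRange 0 9 1).map (fun i => (row, i))
def pvCoordsCol (col : Int) : List (Int × Int) := (PySem.List.pyRange 0 9 1).map (fun i => (i, col))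
def pvCoordsBox (row col : Int) : List (Int × Int) :=
  (PySem.List.pyRange 0 3 1).flatMap fun i => (PySem.List.pyRange 0 3 1).map fun j =>
    (3 * PySem.Int.floordiv row 3 + i, 3 * PySem.Int.floordiv col 3 + j)

-- Every access of the scan exists.
def pvPhaseSafe (board : List (List Int)) (cs : List (Int × Int)) : Bool :=
  cs.all fun rc => (pvAcc? board rc).isSome

-- Some access of the scan sees a non-zero value already seen, with every access up to it existing.
def pvPhaseDup (board : List (List Int)) (cs : List (Int × Int)) : Bool :=
  (List.range cs.length).any fun j =>
    ((List.range (j + 1)).all fun i => (pvAcc? board cs[i]!).isSome) &&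
    (pvAcc? board cs[j]! != some 0) &&
    ((List.range j).any fun k => pvAcc? board cs[k]! == pvAcc? board cs[j]!)

-- Pre_ is exactly the inputs on which A returns: n = 0 (A returns False before touching the board),
-- or each scan in turn either finds a duplicate among existing cells (A returns False there) or has
-- all nine of its accesses existing.
def Pre_check_row_col_box (board : List (List Int)) (row : Int) (col : Int) (n : Int) : Prop :=
  n = 0 ∨ pvPhaseDup board (pvCoordsRow row) = true ∨
    (pvPhaseSafe board (pvCoordsRow row) = true ∧ pvPhaseDup board (pvCoordsCol col) = true) ∨
    (pvPhaseSafe board (pvCoordsRow row) = true ∧ pvPhaseSafe board (pvCoordsCol col) = true ∧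
      (pvPhaseDup board (pvCoordsBox row col) = true ∨ pvPhaseSafe board (pvCoordsBox row col) = true))
instance (board : List (List Int)) (row : Int) (col : Int) (n : Int) : Decidable (Pre_check_row_col_box board row col n) := by unfold Pre_check_row_col_box; infer_instance

def pvWitness_check_row_col_box : List (List Int) × Int × Int × Int :=
  ([[5,3,0,0,7,0,0,0,0],[6,0,0,1,9,5,0,0,0],[0,9,8,0,0,0,0,6,0],
    [8,0,0,0,6,0,0,0,3],[4,0,0,8,0,3,0,0,1],[7,0,0,0,2,0,0,0,6],
    [0,6,0,0,0,0,2,8,0],[0,0,0,4,1,9,0,0,5],[0,0,0,0,8,0,0,7,9]], 0, 2, 4)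

def Spec_check_row_col_box (board : List (List Int)) (row : Int) (col : Int) (n : Int) (out : Bool) : Prop := out = check_row_col_box_alt board row col n
instance (board : List (List Int)) (row : Int) (col : Int) (n : Int) (out : Bool) : Decidable (Spec_check_row_col_box board row col n out) := by unfold Spec_check_row_col_box; infer_instance

-- ===== CLAIM (what is proved, stated in full; the proofs are below) =====
def Claim_equal_check_row_col_box : Prop := ∀ (board : List (List Int)) (row : Int) (col : Int) (n : Int), Dom_check_row_col_box board row col n → Pre_check_row_col_box board row col n → Spec_check_row_col_box board row col n (check_row_col_box board row col n)

-- ===== LEMMAS AND PROOFS =====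

-- A's seen-dict loop succeeds iff the non-zero cells are pairwise distinct and none is already in d.
theorem pvScanA_eq_true_iff (cells : List Int) (d : PySem.Dict Int Int) :
    pvScanA cells d = true ↔
      (cells.filter (fun v => v ≠ 0)).Nodup ∧ ∀ v ∈ cells, v ≠ 0 → d.contains v = false := by
  induction cells generalizing d with
  | nil => simp [pvScanA]
  | cons v rest ih =>
    by_cases hv : v = 0
    · subst hv
      simp [pvScanA, ih]
    · by_cases hc : PySem.Dict.contains d v = true
      · simp only [pvScanA, if_pos hv, if_pos hc]
        constructor
        · intro h; exact absurd h (by simp)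
        · rintro ⟨-, h⟩
          have := h v (by simp) hv
          rw [this] at hc; exact absurd hc (by simp)
      · have hc' : d.contains v = false := by revert hc; cases d.contains v <;> simp
        simp only [pvScanA, if_pos hv, if_neg hc, ih, List.filter_cons,
          decide_eq_true_eq, List.nodup_cons, List.mem_filter, List.mem_cons,
          PySem.Dict.contains_insert]
        constructor
        · rintro ⟨hnd, hmem⟩
          refine ⟨⟨?_, hnd⟩, ?_⟩
          · rintro ⟨hvr, hv0⟩
            have := hmem v hvr hv0
            simp at this
          · rintro w (rfl | hw) hw0
            · exact hc'
            · exact (Bool.or_eq_false_iff.mp (hmem w hw hw0)).2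
        · rintro ⟨⟨hvnot, hnd⟩, hmem⟩
          refine ⟨hnd, ?_⟩
          intro w hw hw0
          have h1 : d.contains w = false := hmem w (Or.inr hw) hw0
          have h2 : (w == v) = false := by
            rw [beq_eq_false_iff_ne]
            intro he; exact hvnot ⟨he ▸ hw, he ▸ hw0⟩
          simp [h1, h2]

-- B's pairwise test fires iff the non-zero values of the group are not pairwise distinct.
theorem pvDupIn_eq_true_iff (board : List (List Int)) (coords : List (Int × Int)) :
    pvDupIn board coords = true ↔
      ¬ ((coords.map fun rc => pvCell board rc.1 rc.2).filter (fun v => v ≠ 0)).Nodup := by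
  unfold pvDupIn
  rw [List.any_eq_true, List.Nodup, List.pairwise_filter, List.pairwise_iff_getElem]
  simp only [List.mem_range, Bool.and_eq_true, List.any_eq_true, decide_eq_true_eq, beq_iff_eq,
    List.getElem_map, List.length_map]
  constructor
  · rintro ⟨j, hj, hne, k, hk, heq⟩
    rw [getElem!_pos coords j hj] at hne heq
    rw [getElem!_pos coords k (by omega)] at heq
    intro hpw
    exact hpw k j (by omega) hj hk (by rw [heq]; exact hne) hne heq
  · intro h
    push Not at h
    obtain ⟨i, j, hi, hj, hij, hi0, hj0, heq⟩ := h
    refine ⟨j, hj, ?_, i, hij, ?_⟩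
    · rw [getElem!_pos coords j hj]; exact hj0
    · rw [getElem!_pos coords i (by omega), getElem!_pos coords j hj]; exact heq

-- A's seen-dict scan over a group's values and B's pairwise test over its coordinates agree.
theorem scan_eq_not_dupIn (board : List (List Int)) (coords : List (Int × Int)) :
    pvScanA (coords.map fun rc => pvCell board rc.1 rc.2) PySem.Dict.empty = !pvDupIn board coords := by
  have hemp : ∀ v : Int, (PySem.Dict.empty : PySem.Dict Int Int).contains v = false := fun _ => rfl
  rw [Bool.eq_iff_iff, pvScanA_eq_true_iff, Bool.not_eq_eq_eq_not, Bool.not_true,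
    ← Bool.not_eq_true, pvDupIn_eq_true_iff, not_not]
  constructor
  · rintro ⟨h, -⟩; exact h
  · intro h; exact ⟨h, fun v _ _ => hemp v⟩

-- A's offset box traversal and B's origin-based box traversal list the same nine cells.
theorem box_lists_eq (board : List (List Int)) (row col : Int) :
    ((PySem.List.pyRange (0 - PySem.Int.mod row 3) (3 - PySem.Int.mod row 3) 1).flatMap fun i =>
      (PySem.List.pyRange (0 - PySem.Int.mod col 3) (3 - PySem.Int.mod col 3) 1).map fun j =>
        pvCell board (row + i) (col + j)) =
    ((PySem.List.pyRange 0 3 1).flatMap fun i =>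
      (PySem.List.pyRange 0 3 1).map fun j =>
        pvCell board (3 * PySem.Int.floordiv row 3 + i) (3 * PySem.Int.floordiv col 3 + j)) := by
  have hr := PySem.Int.floordiv_mul_add_mod row 3
  have hc := PySem.Int.floordiv_mul_add_mod col 3
  set r1 := PySem.Int.mod row 3
  set c1 := PySem.Int.mod col 3
  set qr := PySem.Int.floordiv row 3
  set qc := PySem.Int.floordiv col 3
  have e1 : PySem.List.pyRange (0 - r1) (3 - r1) 1 = [0 - r1, 0 - r1 + 1, 0 - r1 + 1 + 1] := by
    rw [PySem.List.pyRange_one_cons (by omega), PySem.List.pyRange_one_cons (by omega),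
      PySem.List.pyRange_one_cons (by omega), PySem.List.pyRange_one_eq_nil (by omega)]
  have e2 : PySem.List.pyRange (0 - c1) (3 - c1) 1 = [0 - c1, 0 - c1 + 1, 0 - c1 + 1 + 1] := by
    rw [PySem.List.pyRange_one_cons (by omega), PySem.List.pyRange_one_cons (by omega),
      PySem.List.pyRange_one_cons (by omega), PySem.List.pyRange_one_eq_nil (by omega)]
  have e3 : PySem.List.pyRange 0 3 1 = [0, 1, 2] := by decide
  rw [e1, e2, e3]
  simp only [List.flatMap_cons, List.flatMap_nil, List.map_cons, List.map_nil, List.append_nil]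
  rw [show row + (0 - r1) = 3 * qr + 0 by omega, show row + (0 - r1 + 1) = 3 * qr + 1 by omega,
      show row + (0 - r1 + 1 + 1) = 3 * qr + 2 by omega, show col + (0 - c1) = 3 * qc + 0 by omega,
      show col + (0 - c1 + 1) = 3 * qc + 1 by omega, show col + (0 - c1 + 1 + 1) = 3 * qc + 2 by omega]

-- ===== VERDICT (by name: the statement is the Claim_ definition above) =====
theorem check_row_col_box_spec : Claim_equal_check_row_col_box := by
  intro board row col n _ _
  unfold Spec_check_row_col_box check_row_col_box check_row_col_box_alt
  by_cases hn : n = 0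
  · simp [hn]
  · simp only [if_neg hn]
    have h1 : pvScanA ((PySem.List.pyRange 0 9 1).map fun i => pvCell board row i)
        PySem.Dict.empty = !pvDupIn board ((PySem.List.pyRange 0 9 1).map fun i => (row, i)) := by
      rw [← scan_eq_not_dupIn, List.map_map]; rfl
    have h2 : pvScanA ((PySem.List.pyRange 0 9 1).map fun i => pvCell board i col)
        PySem.Dict.empty = !pvDupIn board ((PySem.List.pyRange 0 9 1).map fun i => (i, col)) := by
      rw [← scan_eq_not_dupIn, List.map_map]; rfl
    have h3 : pvScanA ((PySem.List.pyRange (0 - PySem.Int.mod row 3) (3 - PySem.Int.mod row 3) 1).flatMap fun i =>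
          (PySem.List.pyRange (0 - PySem.Int.mod col 3) (3 - PySem.Int.mod col 3) 1).map fun j =>
            pvCell board (row + i) (col + j)) PySem.Dict.empty
        = !pvDupIn board ((PySem.List.pyRange 0 3 1).flatMap fun i =>
            (PySem.List.pyRange 0 3 1).map fun j =>
              (3 * PySem.Int.floordiv row 3 + i, 3 * PySem.Int.floordiv col 3 + j)) := by
      rw [← scan_eq_not_dupIn, box_lists_eq, List.map_flatMap]
      simp only [List.map_map]; rfl
    rw [h1, h2, h3]
    simp only [List.any_cons, List.any_nil, Bool.or_false]
    cases pvDupIn board ((PySem.List.pyRange 0 9 1).map fun i => (row, i)) <;>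
      cases pvDupIn board ((PySem.List.pyRange 0 9 1).map fun i => (i, col)) <;>
        cases pvDupIn board ((PySem.List.pyRange 0 3 1).flatMap fun i =>
          (PySem.List.pyRange 0 3 1).map fun j =>
            (3 * PySem.Int.floordiv row 3 + i, 3 * PySem.Int.floordiv col 3 + j)) <;> simp
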